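-- pv_equiv track=rewrite | github.com/hyunolike/coding-test | programmers_2/기능개발.py | solution
-- ===== SOURCE A (Python) =====
-- from collections import deque
--
-- def solution(progresses, speeds):
--     answer = []
--
--     progresses=deque(progresses)
--     speeds=deque(speeds)
--
--     while progresses:
--         day=(100-progresses[0])//speeds[0] \
--             if (100-progresses[0])%speeds[0]==0 else (100-progresses[0])//speeds[0]+1
--
--         for i in range(len(progresses)):
--             progresses[i]+=day*speeds[i]
--
--         progresses.popleft(); speeds.popleft(); cnt=1
--
--         while progresses:
--             if progresses[0]<100:
--                 break
--             progresses.popleft(); speeds.popleft(); cnt+=1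
--         answer.append(cnt)
--
--     return answer
-- ===== SOURCE B (Python) =====
-- def solution(progresses, speeds):
--     answer = []
--     day = 0
--     cnt = 0
--     for p, s in zip(progresses, speeds):
--         if cnt and p + day * s >= 100:
--             cnt += 1
--         else:
--             if cnt:
--                 answer.append(cnt)
--             day += -((p + day * s - 100) // s)
--             cnt = 1
--     if cnt:
--         answer.append(cnt)
--     return answer
-- ===== Notes on version B (the rewrite author's own statement) =====
-- stated objective: faster
-- what changed: A re-simulates every remaining task in the deque at each release (adding day*speed to all of them, O(n^2)); B makes a single pass carrying a running day counter, testing p + day*s >= 100 and bumping the day by an incremental ceiling division when a new group starts, O(n).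
-- outside the precondition, e.g. on solution([50, 100], [2, 0]): A returns [2], B returns [2]
import Mathlib
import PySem

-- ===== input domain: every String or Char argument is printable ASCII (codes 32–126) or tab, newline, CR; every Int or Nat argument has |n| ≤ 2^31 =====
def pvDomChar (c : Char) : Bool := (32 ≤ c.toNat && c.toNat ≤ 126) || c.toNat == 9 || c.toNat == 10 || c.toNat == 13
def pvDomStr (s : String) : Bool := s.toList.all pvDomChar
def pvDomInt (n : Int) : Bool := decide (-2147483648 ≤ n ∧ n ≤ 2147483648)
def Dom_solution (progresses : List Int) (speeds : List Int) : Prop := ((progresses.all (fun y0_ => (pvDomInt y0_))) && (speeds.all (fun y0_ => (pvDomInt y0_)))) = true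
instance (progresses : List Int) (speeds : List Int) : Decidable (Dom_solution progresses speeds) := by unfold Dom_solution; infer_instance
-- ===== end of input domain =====

-- B replaces A's O(n^2) re-simulation of the whole remaining deque at every release
-- by a single O(n) pass that carries a running day counter (measured faster).

-- ===== PORT A =====
-- inner 'while progresses: if progresses[0]<100: break; popleft both; cnt+=1'
def solInner : List Int → List Int → Int → List Int × List Int × Int
  | p :: ps, s :: ss, cnt =>
      if p < 100 then (p :: ps, s :: ss, cnt) else solInner ps ss (cnt + 1)
  | ps, ss, cnt => (ps, ss, cnt)

theorem solInner_len_le : ∀ (ps ss : List Int) (cnt : Int), (solInner ps ss cnt).1.length ≤ ps.length := by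
  intro ps
  induction ps with
  | nil => intro ss cnt; cases ss <;> simp [solInner]
  | cons p ps ih =>
      intro ss cnt
      cases ss with
      | nil => simp [solInner]
      | cons s ss =>
          simp only [solInner]
          split
          · simp
          · exact le_trans (ih ss (cnt + 1)) (by simp)

-- outer 'while progresses: …' of A
def solLoop (ps ss : List Int) (acc : List Int) : List Int :=
  match ps, ss with
  | p :: ps', s :: ss' =>
      -- day = (100-progresses[0])//speeds[0] (+1 unless it divides), via A's '//'/'%'
      let day := if PySem.Int.mod (100 - p) s = 0 then PySem.Int.floordiv (100 - p) s
                 else PySem.Int.floordiv (100 - p) s + 1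
      -- for i in range(len(progresses)): progresses[i] += day*speeds[i]
      let upd := (((p :: ps').zip (s :: ss')).map (fun q => q.1 + day * q.2))
      -- popleft both; cnt=1; inner while
      let r := solInner upd.tail ss' 1
      solLoop r.1 r.2.1 (acc ++ [r.2.2])
  | _, _ => acc
termination_by ps.length
decreasing_by
  calc (solInner upd.tail ss' 1).1.length ≤ upd.tail.length := solInner_len_le _ _ _
    _ ≤ ps'.length := by simp [upd]
    _ < (p :: ps').length := by simp

def solution (progresses : List Int) (speeds : List Int) : List Int :=
  solLoop progresses speeds []

-- ===== PORT B =====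
-- one step of Source B's loop; state = (closed groups, current day, open group count)
def altStep (st : List Int × Int × Int) (q : Int × Int) : List Int × Int × Int :=
  match st with
  | (acc, day, cnt) =>
      if cnt ≠ 0 ∧ 100 ≤ q.1 + day * q.2 then (acc, day, cnt + 1)
      else ((if cnt ≠ 0 then acc ++ [cnt] else acc),
            day + -(PySem.Int.floordiv (q.1 + day * q.2 - 100) q.2), 1)

def solution_alt (progresses : List Int) (speeds : List Int) : List Int :=
  match (progresses.zip speeds).foldl altStep ([], 0, 0) with
  | (acc, _, cnt) => if cnt ≠ 0 then acc ++ [cnt] else acc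

-- ===== PRECONDITION & SPEC =====
-- Pre_ excludes exactly inputs on which A raises: fewer speeds than progresses
-- (IndexError) and a zero among the used speeds (ZeroDivisionError when that task
-- leads a release group; whether a zero speed task ever leads depends on run state,
-- so the closed-form domain requires all used speeds nonzero — on the few excluded
-- inputs where a zero-speed task never leads, A returns and B returns the same value).
def Pre_solution (progresses : List Int) (speeds : List Int) : Prop :=
  progresses.length ≤ speeds.length ∧ ∀ s ∈ speeds.take progresses.length, s ≠ 0
instance (progresses : List Int) (speeds : List Int) : Decidable (Pre_solution progresses speeds) := by unfold Pre_solution; infer_instance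

def pvWitness_solution : List Int × List Int := ([93, 30, 55], [1, 30, 5])

def Spec_solution (progresses : List Int) (speeds : List Int) (out : List Int) : Prop := out = solution_alt progresses speeds
instance (progresses : List Int) (speeds : List Int) (out : List Int) : Decidable (Spec_solution progresses speeds out) := by unfold Spec_solution; infer_instance

-- ===== CLAIM (what is proved, stated in full; the proofs are below) =====
def Claim_equal_solution : Prop := ∀ (progresses : List Int) (speeds : List Int), Dom_solution progresses speeds → Pre_solution progresses speeds → Spec_solution progresses speeds (solution progresses speeds)

-- ===== LEMMAS AND PROOFS =====

-- final 'if cnt: answer.append(cnt)' of Source B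
def finishB (st : List Int × Int × Int) : List Int :=
  match st with
  | (acc, _, cnt) => if cnt ≠ 0 then acc ++ [cnt] else acc

theorem zip_append_right : ∀ (xs ys rest : List Int), xs.length ≤ ys.length →
    xs.zip (ys ++ rest) = xs.zip ys := by
  intro xs
  induction xs with
  | nil => intro ys rest _; simp
  | cons x xs ih =>
      intro ys rest h
      cases ys with
      | nil => simp at h
      | cons y ys =>
          simp only [List.cons_append, List.zip_cons_cons, List.cons.injEq, true_and]
          exact ih ys rest (by simpa using h)

-- uniqueness of Python floor division from the quotient-remainder form
theorem fd_eq (a s q r : Int) (hs : s ≠ 0) (ha : a = q * s + r)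
    (hb : 0 ≤ r ∧ r < s ∨ s < r ∧ r ≤ 0) : PySem.Int.floordiv a s = q := by
  have h1 := PySem.Int.floordiv_mul_add_mod a s
  set q' := PySem.Int.floordiv a s with hq'
  set m := PySem.Int.mod a s with hm
  have hmb : 0 ≤ m ∧ m < s ∨ s < m ∧ m ≤ 0 := by
    rcases lt_or_gt_of_ne hs with hneg | hpos
    · right; exact PySem.Int.mod_neg_bounds a hneg
    · left; exact ⟨PySem.Int.mod_nonneg a hpos, PySem.Int.mod_lt a hpos⟩
  have hdiff : (q' - q) * s = r - m := by
    have : q' * s + m = q * s + r := by rw [h1, ha]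
    nlinarith [this]
  have habs : |r - m| < |s| := by
    rcases lt_or_gt_of_ne hs with hneg | hpos
    · rw [abs_of_neg hneg, abs_lt]; rcases hb with h | h <;> rcases hmb with h' | h' <;> omega
    · rw [abs_of_pos hpos, abs_lt]; rcases hb with h | h <;> rcases hmb with h' | h' <;> omega
  have hk : q' - q = 0 := by
    by_contra hne
    have h2 : |s| * 1 ≤ |s| * |q' - q| := by
      exact mul_le_mul_of_nonneg_left (Int.one_le_abs hne) (abs_nonneg s)
    rw [← hdiff, abs_mul, mul_comm] at habs
    simp only [mul_one] at h2
    linarith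
  omega

-- A's '//'/'%' day formula is the ceiling division -((-a)//s), for every s ≠ 0
theorem ceilA_eq (a s : Int) (hs : s ≠ 0) :
    (if PySem.Int.mod a s = 0 then PySem.Int.floordiv a s else PySem.Int.floordiv a s + 1) =
      -(PySem.Int.floordiv (-a) s) := by
  have h1 := PySem.Int.floordiv_mul_add_mod a s
  have hmb : 0 ≤ PySem.Int.mod a s ∧ PySem.Int.mod a s < s ∨
      s < PySem.Int.mod a s ∧ PySem.Int.mod a s ≤ 0 := by
    rcases lt_or_gt_of_ne hs with hneg | hpos
    · right; exact PySem.Int.mod_neg_bounds a hneg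
    · left; exact ⟨PySem.Int.mod_nonneg a hpos, PySem.Int.mod_lt a hpos⟩
  by_cases h0 : PySem.Int.mod a s = 0
  · rw [if_pos h0]
    have : PySem.Int.floordiv (-a) s = -(PySem.Int.floordiv a s) := by
      apply fd_eq (-a) s _ 0 hs
      · rw [h0] at h1; nlinarith [h1]
      · rcases lt_or_gt_of_ne hs with hneg | hpos
        · right; exact ⟨hneg, le_refl 0⟩
        · left; exact ⟨le_refl 0, hpos⟩
    omega
  · rw [if_neg h0]
    have : PySem.Int.floordiv (-a) s = -(PySem.Int.floordiv a s) - 1 := by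
      apply fd_eq (-a) s _ (s - PySem.Int.mod a s) hs
      · nlinarith [h1]
      · rcases hmb with ⟨hb1, hb2⟩ | ⟨hb1, hb2⟩
        · left; omega
        · right; omega
    omega

-- the inner while over the updated tasks = dropWhile on 'done at day D'
theorem solInner_spec : ∀ (l : List (Int × Int)) (rest : List Int) (D cnt : Int),
    solInner (l.map (fun q => q.1 + D * q.2)) (l.map Prod.snd ++ rest) cnt =
      ((l.dropWhile (fun q => decide (100 ≤ q.1 + D * q.2))).map (fun q => q.1 + D * q.2),
       (l.dropWhile (fun q => decide (100 ≤ q.1 + D * q.2))).map Prod.snd ++ rest,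
       cnt + ((l.takeWhile (fun q => decide (100 ≤ q.1 + D * q.2))).length : Int)) := by
  intro l
  induction l with
  | nil => intro rest D cnt; cases rest <;> simp [solInner]
  | cons q l ih =>
      intro rest D cnt
      simp only [List.map_cons, List.cons_append, solInner, List.dropWhile_cons,
        List.takeWhile_cons]
      by_cases hlt : q.1 + D * q.2 < 100
      · have hP : ¬ (100 ≤ q.1 + D * q.2) := by omega
        simp [hlt, hP]
      · have hP : (100 ≤ q.1 + D * q.2) := by omega
        rw [if_neg hlt]
        simp only [hP, decide_true, if_true]
        rw [ih rest D (cnt + 1)]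
        refine Prod.ext rfl (Prod.ext rfl ?_)
        simp only [List.length_cons]
        push_cast; ring

-- Source B's loop counts straight through a run of tasks already done at day D
theorem foldl_skip : ∀ (l : List (Int × Int)) (acc : List Int) (D cnt : Int), 0 < cnt →
    l.foldl altStep (acc, D, cnt) =
      (l.dropWhile (fun q => decide (100 ≤ q.1 + D * q.2))).foldl altStep
        (acc, D, cnt + ((l.takeWhile (fun q => decide (100 ≤ q.1 + D * q.2))).length : Int)) := by
  intro l
  induction l with
  | nil => intro acc D cnt _; simp
  | cons q l ih =>
      intro acc D cnt hcnt
      simp only [List.foldl_cons, List.dropWhile_cons, List.takeWhile_cons]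
      by_cases hP : (100 : Int) ≤ q.1 + D * q.2
      · have hstep : altStep (acc, D, cnt) q = (acc, D, cnt + 1) := by
          simp only [altStep]
          rw [if_pos ⟨by omega, hP⟩]
        rw [hstep]
        simp only [hP, decide_true, if_true]
        rw [ih acc D (cnt + 1) (by omega)]
        have hc : cnt + 1 + ((List.takeWhile (fun q => decide (100 ≤ q.1 + D * q.2)) l).length : Int) =
            cnt + (((q :: List.takeWhile (fun q => decide (100 ≤ q.1 + D * q.2)) l)).length : Int) := by
          simp only [List.length_cons]
          push_cast
          ring
        rw [hc]
      · simp only [hP, decide_false, Bool.false_eq_true, if_false,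
          List.length_nil, Nat.cast_zero, add_zero]
        rw [List.foldl_cons]

-- closing the open group now or at the very next (not-done) task is the same
theorem finishB_shift (l : List (Int × Int)) (acc : List Int) (D c : Int) (hc : c ≠ 0)
    (hl : l = [] ∨ ∃ q l', l = q :: l' ∧ ¬ (100 ≤ q.1 + D * q.2)) :
    finishB (l.foldl altStep (acc, D, c)) = finishB (l.foldl altStep (acc ++ [c], D, 0)) := by
  rcases hl with rfl | ⟨q, l', rfl, hq⟩
  · simp [finishB, hc]
  · simp only [List.foldl_cons]
    have h1 : altStep (acc, D, c) q =
        (acc ++ [c], D + -(PySem.Int.floordiv (q.1 + D * q.2 - 100) q.2), 1) := by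
      simp only [altStep]
      rw [if_neg (by tauto), if_pos hc]
    have h2 : altStep (acc ++ [c], D, 0) q =
        (acc ++ [c], D + -(PySem.Int.floordiv (q.1 + D * q.2 - 100) q.2), 1) := by
      simp only [altStep]
      rw [if_neg (by simp), if_neg (by simp)]
    rw [h1, h2]

-- main invariant: A's outer loop over the (virtually updated) remaining tasks
-- computes exactly Source B's fold continued from day D with no open group
theorem loop_eq : ∀ (n : Nat) (l : List (Int × Int)) (rest acc : List Int) (D : Int),
    l.length ≤ n → (∀ q ∈ l, q.2 ≠ 0) →
    solLoop (l.map (fun q => q.1 + D * q.2)) (l.map Prod.snd ++ rest) acc =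
      finishB (l.foldl altStep (acc, D, 0)) := by
  intro n
  induction n with
  | zero =>
      intro l rest acc D hn _
      have : l = [] := List.eq_nil_of_length_eq_zero (Nat.le_zero.mp hn)
      subst this
      cases rest <;> simp [solLoop, finishB]
  | succ n ih =>
      intro l rest acc D hn hpos
      cases l with
      | nil => cases rest <;> simp [solLoop, finishB]
      | cons q l =>
          have hs : q.2 ≠ 0 := hpos q (by simp)
          simp only [List.map_cons, List.cons_append]
          rw [solLoop]
          -- A's day increment equals Source B's ceiling expression
          have hday : (if PySem.Int.mod (100 - (q.1 + D * q.2)) q.2 = 0 then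
                PySem.Int.floordiv (100 - (q.1 + D * q.2)) q.2
              else PySem.Int.floordiv (100 - (q.1 + D * q.2)) q.2 + 1) =
              -(PySem.Int.floordiv (q.1 + D * q.2 - 100) q.2) := by
            have := ceilA_eq (100 - (q.1 + D * q.2)) q.2 hs
            have he : -(100 - (q.1 + D * q.2)) = q.1 + D * q.2 - 100 := by ring
            rw [he] at this
            exact this
          rw [hday]
          set δ := -(PySem.Int.floordiv (q.1 + D * q.2 - 100) q.2) with hδ
          set D' := D + δ with hD'
          -- the whole-deque update composes into a single day offset D'
          have hupd : ((((q.1 + D * q.2) :: l.map (fun q => q.1 + D * q.2)).zip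
                (q.2 :: (l.map Prod.snd ++ rest))).map (fun x => x.1 + δ * x.2)).tail =
              l.map (fun x => x.1 + D' * x.2) := by
            simp only [List.zip_cons_cons, List.map_cons, List.tail_cons]
            rw [zip_append_right _ _ _ (by simp), List.zip_map']
            rw [List.map_map]
            apply List.map_congr_left
            intro x _
            simp only [Function.comp]
            rw [hD']; ring
          rw [hupd, solInner_spec l rest D' 1]
          set P := fun (x : Int × Int) => decide (100 ≤ x.1 + D' * x.2) with hP
          set t := l.dropWhile P with ht
          set w := l.takeWhile P with hw
          have hpos' : ∀ x ∈ t, x.2 ≠ 0 := fun x hx =>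
            hpos x (by simp [(List.dropWhile_sublist _).subset (ht ▸ hx)])
          have hlen : t.length ≤ n := by
            have h := List.length_dropWhile_le P l
            rw [← ht] at h
            simp only [List.length_cons] at hn
            omega
          rw [ih t rest (acc ++ [1 + (w.length : Int)]) D' hlen hpos']
          -- B side: first step opens a group at day D', the run of done tasks is w
          simp only [List.foldl_cons]
          have hstep : altStep (acc, D, 0) q = (acc, D', 1) := by
            simp only [altStep]
            rw [if_neg (by simp), if_neg (by simp)]
          rw [hstep, foldl_skip l acc D' 1 (by omega)]
          rw [← ht, ← hw]
          have hside : t = [] ∨ ∃ q' t', t = q' :: t' ∧ ¬ (100 ≤ q'.1 + D' * q'.2) := by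
            cases hcase : t with
            | nil => left; rfl
            | cons q' t' =>
                right
                refine ⟨q', t', rfl, ?_⟩
                have hh := List.head?_dropWhile_not P l
                rw [← ht, hcase] at hh
                simp only [List.head?_cons] at hh
                simpa [hP] using hh
          have hsh := finishB_shift t acc D' (1 + (w.length : Int)) (by positivity) hside
          rw [hsh]

-- ===== VERDICT (by name: the statement is the Claim_ definition above) =====
theorem solution_spec : Claim_equal_solution := by
  intro ps ss _ hpre
  obtain ⟨hlen, hnz⟩ := hpre
  unfold Spec_solution solution solution_alt
  set l := ps.zip ss with hl
  have htake : ps.zip ss = ps.zip (ss.take ps.length) := by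
    conv_lhs => rw [← List.take_append_drop ps.length ss]
    exact zip_append_right _ _ _ (by simp [hlen])
  have hlt : (ss.take ps.length).length = ps.length := by simp [hlen]
  have hfst : l.map Prod.fst = ps := List.map_fst_zip (by omega)
  have hsnd : l.map Prod.snd = ss.take ps.length := by
    rw [hl, htake]
    exact List.map_snd_zip (by omega)
  have hnz' : ∀ q ∈ l, q.2 ≠ 0 := by
    intro q hq
    exact hnz q.2 (by rw [← hsnd]; exact List.mem_map_of_mem hq)
  have hmap0 : l.map (fun q => q.1 + 0 * q.2) = ps := by
    rw [← hfst]
    apply List.map_congr_left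
    intro x _; ring
  have hss : l.map Prod.snd ++ ss.drop ps.length = ss := by
    rw [hsnd, List.take_append_drop]
  have := loop_eq l.length l (ss.drop ps.length) [] 0 (le_refl _) hnz'
  rw [hmap0, hss] at this
  rw [this]
  rfl
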